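-- pv_equiv track=rewrite | github.com/EmetLabsReal/emet | python/emet/domains/kuramoto.py | hermite_partition
-- ===== SOURCE A (Python) =====
-- def flat_index(n_hermite: int, theta_idx: int, hermite_idx: int) -> int:
--     return int(theta_idx * n_hermite + hermite_idx)
--
-- def hermite_partition(n_theta: int, n_hermite: int) -> tuple[list[int], list[int]]:
--     """Retained: all sites, mode 0. Omitted: all sites, modes 1+."""
--     if n_theta < 1 or n_hermite < 2:
--         raise ValueError("require n_theta >= 1 and n_hermite >= 2")
--     retained = [flat_index(n_hermite, i, 0) for i in range(n_theta)]
--     omitted = [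
--         flat_index(n_hermite, i, j)
--         for i in range(n_theta)
--         for j in range(1, n_hermite)
--     ]
--     return retained, omitted
-- ===== SOURCE B (Python) =====
-- def hermite_partition(n_theta: int, n_hermite: int) -> tuple[list[int], list[int]]:
--     """Retained: all sites, mode 0. Omitted: all sites, modes 1+."""
--     if n_theta < 1 or n_hermite < 2:
--         raise ValueError("require n_theta >= 1 and n_hermite >= 2")
--     retained = []
--     omitted = []
--     for idx in range(n_theta * n_hermite):
--         if idx % n_hermite == 0:
--             retained.append(idx)
--         else:
--             omitted.append(idx)
--     return retained, omitted
-- ===== Notes on version B (the rewrite author's own statement) =====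
-- stated objective: alternative
-- what changed: Replaces A's two (i,j)-indexed comprehensions (one per output list) with a single flat scan over range(n_theta*n_hermite) that partitions each flat index by the test idx % n_hermite == 0.
import Mathlib
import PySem

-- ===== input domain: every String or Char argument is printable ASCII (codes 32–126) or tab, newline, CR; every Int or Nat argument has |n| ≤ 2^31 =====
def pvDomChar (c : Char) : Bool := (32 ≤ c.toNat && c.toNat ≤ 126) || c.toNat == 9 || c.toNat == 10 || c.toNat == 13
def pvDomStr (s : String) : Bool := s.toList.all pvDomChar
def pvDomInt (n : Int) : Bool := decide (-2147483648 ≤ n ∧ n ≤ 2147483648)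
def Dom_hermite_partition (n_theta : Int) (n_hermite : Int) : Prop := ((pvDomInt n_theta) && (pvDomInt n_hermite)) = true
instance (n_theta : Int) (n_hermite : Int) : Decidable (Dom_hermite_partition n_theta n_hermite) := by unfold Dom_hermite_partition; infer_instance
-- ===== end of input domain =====

-- B replaces A's two (i,j)-indexed comprehensions with one flat modulo-partition scan; equal output on Pre_ (A raises ValueError outside it).

-- ===== PORT A =====
def flat_index (n_hermite : Int) (theta_idx : Int) (hermite_idx : Int) : Int :=
  theta_idx * n_hermite + hermite_idx

def hermite_partition (n_theta : Int) (n_hermite : Int) : List Int × List Int :=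
  let retained := (PySem.List.pyRange 0 n_theta 1).map (fun i => flat_index n_hermite i 0)
  let omitted := (PySem.List.pyRange 0 n_theta 1).flatMap
    (fun i => (PySem.List.pyRange 1 n_hermite 1).map (fun j => flat_index n_hermite i j))
  (retained, omitted)

-- ===== PORT B =====
def hermite_partition_alt (n_theta : Int) (n_hermite : Int) : List Int × List Int :=
  (PySem.List.pyRange 0 (n_theta * n_hermite) 1).foldl
    (fun acc idx =>
      if PySem.Int.mod idx n_hermite = 0 then (acc.1 ++ [idx], acc.2)
      else (acc.1, acc.2 ++ [idx]))
    ([], [])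

-- ===== PRECONDITION & SPEC =====
-- A raises ValueError exactly when n_theta < 1 or n_hermite < 2.
def Pre_hermite_partition (n_theta : Int) (n_hermite : Int) : Prop :=
  1 ≤ n_theta ∧ 2 ≤ n_hermite
instance (n_theta : Int) (n_hermite : Int) : Decidable (Pre_hermite_partition n_theta n_hermite) := by
  unfold Pre_hermite_partition; infer_instance

def pvWitness_hermite_partition : Int × Int := (3, 2)

def Spec_hermite_partition (n_theta : Int) (n_hermite : Int) (out : List Int × List Int) : Prop := out = hermite_partition_alt n_theta n_hermite
instance (n_theta : Int) (n_hermite : Int) (out : List Int × List Int) : Decidable (Spec_hermite_partition n_theta n_hermite out) := by unfold Spec_hermite_partition; infer_instance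

-- ===== CLAIM (what is proved, stated in full; the proofs are below) =====
def Claim_equal_hermite_partition : Prop := ∀ (n_theta : Int) (n_hermite : Int), Dom_hermite_partition n_theta n_hermite → Pre_hermite_partition n_theta n_hermite → Spec_hermite_partition n_theta n_hermite (hermite_partition n_theta n_hermite)

-- ===== LEMMAS AND PROOFS =====

-- B's fold partitions the scanned list into (filter p, filter ¬p), appended to the accumulator.
theorem foldl_partition (h : Int) (l : List Int) (r o : List Int) :
    l.foldl
      (fun acc idx =>
        if PySem.Int.mod idx h = 0 then (acc.1 ++ [idx], acc.2)
        else (acc.1, acc.2 ++ [idx]))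
      (r, o)
    = (r ++ l.filter (fun x => decide (PySem.Int.mod x h = 0)),
       o ++ l.filter (fun x => !decide (PySem.Int.mod x h = 0))) := by
  induction l generalizing r o with
  | nil => simp
  | cons x xs ih =>
    by_cases hx : PySem.Int.mod x h = 0 <;> simp [hx, ih]

-- shift a unit-step range
theorem map_add_pyRange (c a b : Int) :
    (PySem.List.pyRange a b 1).map (fun j => c + j) = PySem.List.pyRange (c + a) (c + b) 1 := by
  rw [PySem.List.pyRange_one, PySem.List.pyRange_one]
  have : c + b - (c + a) = b - a := by ring
  rw [this, List.map_map]
  apply List.map_congr_left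
  intro k _
  simp; ring

-- the core induction: the filtered flat range equals A's two comprehensions
theorem partition_range (h : Int) (hh : 0 < h) (n : Nat) :
    (PySem.List.pyRange 0 ((n : Int) * h) 1).filter (fun x => decide (PySem.Int.mod x h = 0))
      = (PySem.List.pyRange 0 (n : Int) 1).map (fun i => flat_index h i 0)
    ∧ (PySem.List.pyRange 0 ((n : Int) * h) 1).filter (fun x => !decide (PySem.Int.mod x h = 0))
      = (PySem.List.pyRange 0 (n : Int) 1).flatMap
          (fun i => (PySem.List.pyRange 1 h 1).map (fun j => flat_index h i j)) := by
  induction n with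
  | zero => simp [PySem.List.pyRange_one_eq_nil]
  | succ n ih =>
    have hsplit : PySem.List.pyRange 0 (((n : Int) + 1) * h) 1
        = PySem.List.pyRange 0 ((n : Int) * h) 1 ++ PySem.List.pyRange ((n : Int) * h) (((n : Int) + 1) * h) 1 :=
      PySem.List.pyRange_one_append _ _ _ (by positivity) (by nlinarith)
    have hblock : PySem.List.pyRange ((n : Int) * h) (((n : Int) + 1) * h) 1
        = (n : Int) * h :: PySem.List.pyRange ((n : Int) * h + 1) (((n : Int) + 1) * h) 1 :=
      PySem.List.pyRange_one_cons (by nlinarith)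
    have htail : PySem.List.pyRange ((n : Int) * h + 1) (((n : Int) + 1) * h) 1
        = (PySem.List.pyRange 1 h 1).map (fun j => flat_index h (n : Int) j) := by
      rw [show (((n : Int) + 1) * h) = (n : Int) * h + h by ring, ← map_add_pyRange ((n : Int) * h) 1 h]
      simp [flat_index]
    have hhead : PySem.Int.mod ((n : Int) * h) h = 0 := by
      rw [PySem.Int.mod_eq_zero_iff_dvd]; exact dvd_mul_left h (n : Int)
    -- no element strictly between consecutive multiples of h is divisible by h
    have hnd : ∀ x ∈ PySem.List.pyRange ((n : Int) * h + 1) (((n : Int) + 1) * h) 1,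
        ¬ PySem.Int.mod x h = 0 := by
      intro x hx hmod
      rw [PySem.List.mem_pyRange_one] at hx
      rw [PySem.Int.mod_eq_zero_iff_dvd] at hmod
      obtain ⟨k, rfl⟩ := hmod
      have h1 : (n : Int) < k := by nlinarith [hx.1]
      have h2 : k < (n : Int) + 1 := by nlinarith [hx.2]
      omega
    have hsucc : PySem.List.pyRange 0 ((n : Int) + 1) 1
        = PySem.List.pyRange 0 (n : Int) 1 ++ [(n : Int)] :=
      PySem.List.pyRange_one_succ_right (by positivity)
    constructor
    · rw [show ((n + 1 : Nat) : Int) = (n : Int) + 1 by push_cast; ring, hsplit, List.filter_append, ih.1,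
        hblock, hsucc]
      simp only [List.filter_cons, hhead, decide_true, if_true]
      rw [List.filter_eq_nil_iff.mpr (by intro x hx; simpa using hnd x hx)]
      simp [flat_index]
    · rw [show ((n + 1 : Nat) : Int) = (n : Int) + 1 by push_cast; ring, hsplit, List.filter_append, ih.2,
        hblock, hsucc]
      simp only [List.filter_cons, hhead, decide_true, Bool.not_true]
      rw [List.filter_eq_self.mpr (by intro x hx; simpa using hnd x hx), htail]
      simp

-- ===== VERDICT (by name: the statement is the Claim_ definition above) =====
theorem hermite_partition_spec : Claim_equal_hermite_partition := by
  intro n_theta n_hermite _ hpre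
  obtain ⟨h1, h2⟩ := hpre
  unfold Spec_hermite_partition hermite_partition hermite_partition_alt
  rw [foldl_partition]
  obtain ⟨n, rfl⟩ : ∃ n : Nat, n_theta = (n : Int) :=
    ⟨n_theta.toNat, (Int.toNat_of_nonneg (by omega)).symm⟩
  have := partition_range n_hermite (by omega) n
  simp [this.1, this.2]
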